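-- pv_equiv track=rewrite | github.com/errantlinguist/tangrams-restricted | analysis/scripts/annotation_token_counts.py | equal_casings
-- ===== SOURCE A (Python) =====
-- import collections
-- from typing import DefaultDict, Dict, Iterable, Set
--
-- def equal_casings(tokens: Iterable[str]) -> DefaultDict[str, Set[str]]:
-- 	result = collections.defaultdict(set)
-- 	token_tuple = tuple(tokens)
-- 	for i, t1 in enumerate(token_tuple):
-- 		t1_casefolded = t1.casefold()
-- 		for j, t2 in enumerate(token_tuple):
-- 			if i != j and t2 not in result:
-- 				t2_casefolded = t2.casefold()
-- 				if t1_casefolded == t2_casefolded: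
-- 					result[t1].add(t2)
-- 	return result
-- ===== SOURCE B (Python) =====
-- import collections
-- from typing import DefaultDict, Dict, Iterable, Set
--
--
-- def _collect(result, i, t1, peers):
-- 	# Replay the index/guard logic of the task over t1's same-casefold peers only.
-- 	for j, t2 in peers:
-- 		if i == j:
-- 			continue
-- 		if t2 in result:
-- 			continue
-- 		result[t1].add(t2)
--
--
-- def equal_casings(tokens: Iterable[str]) -> DefaultDict[str, Set[str]]:
-- 	token_tuple = tuple(tokens)
-- 	# Stage 1: one pass building a casefold-keyed index of (position, token) pairs.
-- 	groups = {}
-- 	for j, t2 in enumerate(token_tuple):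
-- 		groups.setdefault(t2.casefold(), []).append((j, t2))
-- 	# Stage 2: per token, delegate to the helper over its own group only.
-- 	result = collections.defaultdict(set)
-- 	for i, t1 in enumerate(token_tuple):
-- 		_collect(result, i, t1, groups[t1.casefold()])
-- 	return result
-- ===== Notes on version B (the rewrite author's own statement) =====
-- stated objective: faster
-- what changed: B builds a casefold-keyed index of (position, token) pairs in one pass and a helper replays the guard logic only over each token's same-casefold peers, replacing A's all-pairs nested scan.
import Mathlib
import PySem

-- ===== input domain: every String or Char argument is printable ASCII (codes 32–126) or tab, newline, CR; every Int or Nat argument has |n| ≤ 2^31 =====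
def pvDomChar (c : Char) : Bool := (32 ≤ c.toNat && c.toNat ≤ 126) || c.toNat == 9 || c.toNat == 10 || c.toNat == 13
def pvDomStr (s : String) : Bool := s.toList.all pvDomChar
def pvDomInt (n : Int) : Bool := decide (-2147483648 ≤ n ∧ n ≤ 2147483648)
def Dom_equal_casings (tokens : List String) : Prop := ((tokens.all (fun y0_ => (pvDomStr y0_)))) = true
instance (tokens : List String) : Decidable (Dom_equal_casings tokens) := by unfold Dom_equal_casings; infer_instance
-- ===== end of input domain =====

-- B replaces A's all-pairs nested scan by a casefold-keyed index built in one pass plus a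
-- helper that replays the guard logic over same-casefold peers only (objective: faster).
-- str.casefold() is ported as PySem.Str.lower: on the printable-ASCII domain they coincide.

-- ===== PORT A =====
def equal_casings (tokens : List String) : List (String × List String) :=
  let token_tuple := tokens
  ((PySem.List.enumerate token_tuple 0).foldl
    (fun result (p : Int × String) =>
      let t1c := PySem.Str.lower p.2
      (PySem.List.enumerate token_tuple 0).foldl
        (fun result (q : Int × String) =>
          if p.1 ≠ q.1 ∧ result.contains q.2 = false then
            let t2c := PySem.Str.lower q.2
            if t1c == t2c then
              result.modify p.2 PySem.Set.empty (fun s => PySem.Set.add s q.2)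
            else result
          else result)
        result)
    (PySem.Dict.empty : PySem.Dict String (PySem.Set String))).items

-- ===== PORT B =====
-- Stage 1 of Source B: build the casefold-keyed index of (position, token) pairs.
def ecGroups : List (Int × String) → PySem.Dict String (List (Int × String)) → PySem.Dict String (List (Int × String))
  | [], g => g
  | q :: rest, g => ecGroups rest (g.modify (PySem.Str.lower q.2) [] (fun l => l ++ [q]))

-- Source B's helper _collect: replay the guard logic over t1's same-casefold peers.
def ecCollect (i : Int) (t1 : String) : List (Int × String) → PySem.Dict String (PySem.Set String) → PySem.Dict String (PySem.Set String)
  | [], result => result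
  | q :: rest, result =>
    if i == q.1 then ecCollect i t1 rest result
    else if result.contains q.2 then ecCollect i t1 rest result
    else ecCollect i t1 rest (result.modify t1 PySem.Set.empty (fun s => PySem.Set.add s q.2))

-- Stage 2 of Source B: loop over the tokens, delegating to the helper on each one's group.
def ecOuter (groups : PySem.Dict String (List (Int × String))) : List (Int × String) → PySem.Dict String (PySem.Set String) → PySem.Dict String (PySem.Set String)
  | [], result => result
  | p :: rest, result => ecOuter groups rest (ecCollect p.1 p.2 (groups.getD (PySem.Str.lower p.2) []) result)

def equal_casings_alt (tokens : List String) : List (String × List String) :=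
  let token_tuple := tokens
  let groups := ecGroups (PySem.List.enumerate token_tuple 0) PySem.Dict.empty
  (ecOuter groups (PySem.List.enumerate token_tuple 0) PySem.Dict.empty).items

-- ===== PRECONDITION & SPEC =====
def Spec_equal_casings (tokens : List String) (out : List (String × List String)) : Prop := out = equal_casings_alt tokens
instance (tokens : List String) (out : List (String × List String)) : Decidable (Spec_equal_casings tokens out) := by unfold Spec_equal_casings; infer_instance

-- ===== CLAIM (what is proved, stated in full; the proofs are below) =====
def Claim_equal_equal_casings : Prop := ∀ (tokens : List String), Dom_equal_casings tokens → Spec_equal_casings tokens (equal_casings tokens)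

-- ===== LEMMAS AND PROOFS =====

-- B's recursive group builder is the fold that appends each pair under its casefold key.
theorem ecGroups_eq_foldl (l : List (Int × String)) (g : PySem.Dict String (List (Int × String))) :
    ecGroups l g
    = l.foldl (fun g (q : Int × String) =>
        g.modify (PySem.Str.lower q.2) [] (fun xs => xs ++ [q])) g := by
  induction l generalizing g with
  | nil => rfl
  | cons q rest ih => simp [ecGroups, List.foldl_cons, ih]

-- B's group index looked up at key c is exactly the list of enumerated tokens whose casefold is c.
theorem getD_groups (l : List (Int × String)) (c : String) :
    ((ecGroups l (PySem.Dict.empty : PySem.Dict String (List (Int × String)))).getD c [])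
    = l.filter (fun q => PySem.Str.lower q.2 == c) := by
  rw [ecGroups_eq_foldl]
  have h := PySem.Dict.getD_foldl_modify_append
    (l.map (fun q : Int × String => (PySem.Str.lower q.2, q)))
    (PySem.Dict.empty : PySem.Dict String (List (Int × String))) c
  rw [List.foldl_map, List.filter_map, List.map_map] at h
  simpa [PySem.Dict.getD_empty, Function.comp_def] using h

-- Source B's helper, written as a fold with A's combined guard.
theorem ecCollect_eq_foldl (i : Int) (t1 : String) (l : List (Int × String))
    (res : PySem.Dict String (PySem.Set String)) :
    ecCollect i t1 l res
    = l.foldl (fun result (q : Int × String) =>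
        if i ≠ q.1 ∧ result.contains q.2 = false then
          result.modify t1 PySem.Set.empty (fun s => PySem.Set.add s q.2)
        else result) res := by
  induction l generalizing res with
  | nil => rfl
  | cons q rest ih =>
    rw [List.foldl_cons]
    by_cases h1 : i = q.1
    · subst h1
      rw [ecCollect]
      simp [ih]
    · by_cases h2 : res.contains q.2
      · rw [ecCollect]
        simp [h1, h2, ih]
      · rw [ecCollect]
        simp [h1, h2, ih]

-- For a fixed outer token (i, t1), A's inner scan over ALL enumerated tokens equals the
-- helper's scan over the same-casefold peers only: skipped pairs leave the accumulator unchanged.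
theorem inner_eq (l : List (Int × String)) (p : Int × String)
    (res : PySem.Dict String (PySem.Set String)) :
    (l.foldl (fun result (q : Int × String) =>
        if p.1 ≠ q.1 ∧ result.contains q.2 = false then
          if PySem.Str.lower p.2 == PySem.Str.lower q.2 then
            result.modify p.2 PySem.Set.empty (fun s => PySem.Set.add s q.2)
          else result
        else result) res)
    = ecCollect p.1 p.2 (l.filter (fun q => PySem.Str.lower q.2 == PySem.Str.lower p.2)) res := by
  rw [ecCollect_eq_foldl, List.foldl_filter]
  apply PySem.List.foldl_congr_mem
  intro acc q _
  by_cases hcf : PySem.Str.lower q.2 = PySem.Str.lower p.2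
  · have hb : (PySem.Str.lower p.2 == PySem.Str.lower q.2) = true := by simp [hcf]
    have hb2 : (PySem.Str.lower q.2 == PySem.Str.lower p.2) = true := by simp [hcf]
    by_cases hg : p.1 ≠ q.1 ∧ acc.contains q.2 = false
    · simp only [hb, hb2, if_pos hg, if_true]
    · simp only [hb, hb2, if_neg hg, if_true]
  · have hb : (PySem.Str.lower p.2 == PySem.Str.lower q.2) = false := by
      simp only [beq_eq_false_iff_ne, ne_eq]
      exact fun h => hcf h.symm
    have hb2 : (PySem.Str.lower q.2 == PySem.Str.lower p.2) = false := by
      simp only [beq_eq_false_iff_ne, ne_eq]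
      exact hcf
    by_cases hg : p.1 ≠ q.1 ∧ acc.contains q.2 = false
    · simp only [hb, hb2, if_pos hg, Bool.false_eq_true, if_false]
    · simp only [hb, hb2, Bool.false_eq_true, if_false, ite_self]

-- B's outer recursion, written as a fold.
theorem ecOuter_eq_foldl (groups : PySem.Dict String (List (Int × String)))
    (l : List (Int × String)) (res : PySem.Dict String (PySem.Set String)) :
    ecOuter groups l res
    = l.foldl (fun result (p : Int × String) =>
        ecCollect p.1 p.2 (groups.getD (PySem.Str.lower p.2) []) result) res := by
  induction l generalizing res with
  | nil => rfl
  | cons p rest ih => simp [ecOuter, List.foldl_cons, ih]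

-- ===== VERDICT (by name: the statement is the Claim_ definition above) =====
theorem equal_casings_spec : Claim_equal_equal_casings := by
  intro tokens _
  unfold Spec_equal_casings equal_casings equal_casings_alt
  dsimp only
  rw [ecOuter_eq_foldl]
  congr 1
  apply PySem.List.foldl_congr_mem
  intro res p _
  rw [getD_groups, inner_eq]
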